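-- pv_equiv track=rewrite | github.com/Sefy76-Curiosity/Basalt-Provenance-Triage-Toolkit | plugins/plugin_manager_v2.py | _get_index_version
-- ===== SOURCE A (Python) =====
-- def _get_index_version(data):
--     """Extract highest plugin version from index."""
--     versions = []
--     for plugin in data:
--         try:
--             ver = plugin.get('version', '0.0.0')
--             ver_tuple = tuple(int(x) for x in ver.split('.'))
--             versions.append(ver_tuple)
--         except:
--             pass
--     return max(versions) if versions else (0, 0, 0)
-- ===== SOURCE B (Python) =====
-- def _parse_version(plugin):
--     """Total parse helper: version tuple, or None if any component fails int()."""
--     try: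
--         return tuple(int(x) for x in plugin.get('version', '0.0.0').split('.'))
--     except:
--         return None
--
-- def _get_index_version(data):
--     """Extract highest plugin version from index (parse-filter-sort pipeline; last of sorted)."""
--     versions = sorted(t for t in map(_parse_version, data) if t is not None)
--     return versions[-1] if versions else (0, 0, 0)
-- ===== Notes on version B (the rewrite author's own statement) =====
-- stated objective: alternative
-- what changed: Replaces the collect-tuples-then-max(list) loop by a staged pipeline: a total parse helper mapped over the plugins, failures filtered out, the survivors sorted, and the last element of the sorted list returned (sort-then-take-last instead of a max scan).
import Mathlib
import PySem

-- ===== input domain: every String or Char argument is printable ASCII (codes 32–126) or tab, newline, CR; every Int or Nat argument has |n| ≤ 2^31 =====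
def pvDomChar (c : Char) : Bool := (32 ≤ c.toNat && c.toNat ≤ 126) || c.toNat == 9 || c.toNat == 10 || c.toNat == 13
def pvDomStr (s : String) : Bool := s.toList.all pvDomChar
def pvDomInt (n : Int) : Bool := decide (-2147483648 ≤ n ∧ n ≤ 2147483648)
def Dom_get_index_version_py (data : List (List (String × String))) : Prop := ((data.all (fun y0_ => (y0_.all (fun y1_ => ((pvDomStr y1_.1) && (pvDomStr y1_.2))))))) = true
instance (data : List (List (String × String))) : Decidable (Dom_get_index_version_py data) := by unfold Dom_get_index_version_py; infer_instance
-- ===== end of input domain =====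

-- B replaces A's collect-then-max(list) loop by a staged map/filter/sort pipeline returning the last element of the sorted list (alternative decomposition; same return value).

-- ===== PORT A =====
-- shared helper: tuple(int(x) for x in ver.split('.')) — none = some int(x) raised ValueError
def pvParseVersion (ver : String) : Option (List Int) :=
  -- ver.split('.'): sep "." is nonempty, so split? is always some; .getD [] is unreachable
  ((PySem.Str.split? ver ".").getD []).foldl
    (fun acc x =>
      match acc, PySem.Int.ofStr? x with
      | some l, some n => some (l ++ [n])
      | _, _ => none)
    (some [])

def get_index_version_py (data : List (List (String × String))) : List Int :=
  let versions : List (List Int) :=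
    data.foldl
      (fun versions plugin =>
        match pvParseVersion ((PySem.Dict.mk plugin).getD "version" "0.0.0") with
        | some v => versions ++ [v]
        | none => versions)
      []
  match PySem.List.max? versions (fun v => v) with
  | some m => m
  | none => [0, 0, 0]

-- ===== PORT B =====
-- _parse_version(plugin): total parse helper (None on failure)
def pvParsePlugin (plugin : List (String × String)) : Option (List Int) :=
  pvParseVersion ((PySem.Dict.mk plugin).getD "version" "0.0.0")

def get_index_version_py_alt (data : List (List (String × String))) : List Int :=
  -- sorted(t for t in map(_parse_version, data) if t is not None)
  let versions : List (List Int) :=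
    PySem.List.sorted ((data.map pvParsePlugin).filterMap id) (fun v => v) false
  -- versions[-1] if versions else (0, 0, 0): pyGet? at -1 is none exactly when the list is empty
  match PySem.List.pyGet? versions (-1) with
  | some v => v
  | none => [0, 0, 0]

-- ===== PRECONDITION & SPEC =====
def Spec_get_index_version_py (data : List (List (String × String))) (out : List Int) : Prop := out = get_index_version_py_alt data
instance (data : List (List (String × String))) (out : List Int) : Decidable (Spec_get_index_version_py data out) := by unfold Spec_get_index_version_py; infer_instance

-- ===== CLAIM =====
def Claim_equal_get_index_version_py : Prop := ∀ (data : List (List (String × String))), Dom_get_index_version_py data → Spec_get_index_version_py data (get_index_version_py data)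

-- ===== LEMMAS AND PROOFS =====

-- A's accumulation loop builds exactly the filterMap of the parse helper
lemma pv_collect_eq (data : List (List (String × String))) :
    ∀ acc : List (List Int),
    data.foldl
      (fun versions plugin =>
        match pvParseVersion ((PySem.Dict.mk plugin).getD "version" "0.0.0") with
        | some v => versions ++ [v]
        | none => versions)
      acc = acc ++ (data.map pvParsePlugin).filterMap id := by
  induction data with
  | nil => intro acc; simp
  | cons p rest ih =>
      intro acc
      simp only [List.foldl_cons, List.map_cons, List.filterMap_cons]
      cases hp : pvParsePlugin p with
      | none =>
          simp only [pvParsePlugin] at hp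
          rw [hp]; simpa using ih acc
      | some v =>
          simp only [pvParsePlugin] at hp
          rw [hp, ih (acc ++ [v])]; simp

-- the last element of the sorted list is max(l) (first maximal; values coincide by antisymmetry)
lemma pv_last_sorted_eq_max (l : List (List Int)) (m : List Int)
    (hm : PySem.List.max? l (fun v => v) = some m) :
    (PySem.List.sorted l (fun v => v) false).getLast? = some m := by
  have hperm := PySem.List.sorted_perm l (fun v => v) false
  have hne : l ≠ [] := by
    intro h; rw [h] at hm; simp [PySem.List.max?] at hm
  have hsne : PySem.List.sorted l (fun v => v) false ≠ [] := by
    intro h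
    exact hne ((h ▸ hperm).symm.eq_nil)
  set s := PySem.List.sorted l (fun v => v) false with hs
  have hlen : 0 < s.length := List.length_pos_iff.mpr hsne
  have hlast : s.getLast? = some s[s.length - 1] := by
    rw [List.getLast?_eq_getElem?, List.getElem?_eq_getElem (by omega)]
  -- s[len-1] ≤ m : it is an element of l and m is maximal
  have hmem : s[s.length - 1] ∈ l := hperm.mem_iff.mp (s.getElem_mem _)
  have hm' : (@PySem.List.max? (List Int) (List Int) List.instLinearOrder.toLT
      LinearOrder.toDecidableLT l fun v => v) = some m := by
    convert hm using 3
  have h1 : s[s.length - 1] ≤ m := PySem.List.max?_isMax hm' _ hmem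
  -- m ≤ s[len-1] : m is some s[i], and s is sorted
  have hmmem : m ∈ s := hperm.mem_iff.mpr (PySem.List.max?_mem hm)
  obtain ⟨i, hi, hms⟩ := List.getElem_of_mem hmmem
  have hse : (@PySem.List.sorted (List Int) (List Int) List.instLinearOrder.toLT
      LinearOrder.toDecidableLT l (fun x => x) false) = s := by
    convert rfl using 3
  have h2 : m ≤ s[s.length - 1] := by
    rw [← hms]
    have := PySem.List.sorted_id_getElem_mono l (p := i) (q := s.length - 1)
      (by omega) (by rw [hse]; omega)
    simpa [hse] using this
  rw [hlast, le_antisymm h1 h2]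

-- ===== VERDICT =====
theorem get_index_version_py_spec : Claim_equal_get_index_version_py := by
  intro data _
  unfold Spec_get_index_version_py get_index_version_py get_index_version_py_alt
  dsimp only
  rw [pv_collect_eq data [], List.nil_append]
  set l := (data.map pvParsePlugin).filterMap id with hl
  rw [PySem.List.pyGet?_neg_one]
  cases hm : PySem.List.max? l (fun v => v) with
  | none =>
      have : l = [] := (PySem.List.max?_eq_none_iff _ _).mp hm
      rw [this]
      rfl
  | some m =>
      rw [pv_last_sorted_eq_max l m hm]
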